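-- pv_equiv track=rewrite | github.com/zanepollard/PT-Generator | format.py | tNumFMT
-- ===== SOURCE A (Python) =====
-- def tNumFMT(tran):
--     if len(tran) > 4:
--         return tran[(len(tran)-4):(len(tran))]
--     else:
--         temp = tran
--         for __ in range(4 - len(tran)):
--             temp = "0" + temp
--         return temp
-- ===== SOURCE B (Python) =====
-- def tNumFMT(tran):
--     return ("0000" + tran)[-4:]
-- ===== Notes on version B (the rewrite author's own statement) =====
-- stated objective: simpler
-- what changed: Replaces the length branch and the zero-prepending loop with a single branchless expression: pad with four zeros then slice the last four characters.
import Mathlib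
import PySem

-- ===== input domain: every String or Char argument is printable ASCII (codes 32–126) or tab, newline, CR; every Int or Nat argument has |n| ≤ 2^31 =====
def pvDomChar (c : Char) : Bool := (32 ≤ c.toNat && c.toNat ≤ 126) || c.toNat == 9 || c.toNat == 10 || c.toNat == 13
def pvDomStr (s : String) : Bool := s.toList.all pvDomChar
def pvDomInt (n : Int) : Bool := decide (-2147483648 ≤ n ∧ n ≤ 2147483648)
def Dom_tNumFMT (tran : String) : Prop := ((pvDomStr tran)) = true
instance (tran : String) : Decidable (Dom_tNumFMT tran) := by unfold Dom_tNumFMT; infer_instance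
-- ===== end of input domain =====

-- B replaces A's length branch and zero-prepend loop with a single slice ("0000"+tran)[-4:] (simpler).


-- ===== PORT A =====
def tNumFMT (tran : String) : String :=
  if PySem.Str.len tran > 4 then
    PySem.Str.slice tran (some (PySem.Str.len tran - 4)) (some (PySem.Str.len tran))
  else
    (PySem.List.pyRange 0 (4 - PySem.Str.len tran) 1).foldl
      (fun temp _ => String.ofList ('0' :: temp.toList)) tran

-- ===== PORT B =====
def tNumFMT_alt (tran : String) : String :=
  PySem.Str.slice (String.ofList ("0000".toList ++ tran.toList)) (some (-4)) none

-- ===== PRECONDITION & SPEC =====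
def Spec_tNumFMT (tran : String) (out : String) : Prop := out = tNumFMT_alt tran
instance (tran : String) (out : String) : Decidable (Spec_tNumFMT tran out) := by unfold Spec_tNumFMT; infer_instance

-- ===== CLAIM (what is proved, stated in full; the proofs are below) =====
def Claim_equal_tNumFMT : Prop := ∀ (tran : String), Dom_tNumFMT tran → Spec_tNumFMT tran (tNumFMT tran)

-- ===== LEMMAS AND PROOFS =====

-- A's prepend loop adds one '0' per range element.
lemma pvFold_toList (r : List Int) (s : String) :
    (r.foldl (fun temp _ => String.ofList ('0' :: temp.toList)) s).toList
      = List.replicate r.length '0' ++ s.toList := by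
  induction r generalizing s with
  | nil => simp
  | cons a r ih => simp [List.foldl_cons, ih, List.replicate_succ']

-- ===== VERDICT (by name: the statement is the Claim_ definition above) =====
theorem tNumFMT_spec : Claim_equal_tNumFMT := by
  intro tran _
  show tNumFMT tran = tNumFMT_alt tran
  unfold tNumFMT tNumFMT_alt
  apply String.toList_injective
  have hL : tran.toList.length = tran.length := by simp
  have hlen : PySem.Str.len tran = (tran.toList.length : Int) := by simp [hL]
  have h0 : "0000".toList = List.replicate 4 '0' := by decide
  by_cases h : PySem.Str.len tran > 4
  · rw [if_pos h]
    have hn : 4 < tran.toList.length := by omega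
    simp only [PySem.Str.slice, PySem.Chars.slice_eq_listSlice, String.toList_ofList]
    rw [PySem.List.slice_from_neg_ofNat _ 4 (by norm_num)]
    rw [hlen]
    have e1 : ((tran.toList.length : Int) - 4) = ((tran.toList.length - 4 : Nat) : Int) := by
      omega
    rw [e1, PySem.List.slice_natCast]
    rw [h0]
    have e3 : (List.replicate 4 '0' ++ tran.toList).length - 4
        = 4 + (tran.toList.length - 4) := by simp [hL]; omega
    rw [e3, ← List.drop_drop, List.drop_append_of_le_length (by simp)]
    simp only [List.drop_replicate, Nat.sub_self, List.replicate_zero, List.nil_append]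
    rw [List.take_of_length_le (by simp)]
  · rw [if_neg h]
    have hn : tran.toList.length ≤ 4 := by omega
    rw [pvFold_toList]
    simp only [PySem.Str.slice, PySem.Chars.slice_eq_listSlice, String.toList_ofList]
    rw [PySem.List.slice_from_neg_ofNat _ 4 (by norm_num)]
    rw [h0, hlen]
    have e2 : ((4:Int) - (tran.toList.length:Int)) = ((4 - tran.toList.length : Nat) : Int) := by
      omega
    rw [e2, PySem.List.length_pyRange_one]
    have hx : (List.replicate 4 '0' ++ tran.toList).length - 4 = tran.toList.length := by simp
    rw [hx]
    rw [List.drop_append_of_le_length (by simp; omega), List.drop_replicate]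
    simp [hL]
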